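-- pv_equiv track=rewrite | github.com/TriforceParas/pythonProjects | trial.py | touched_same_position
-- ===== SOURCE A (Python) =====
-- def touched_same_position(path: str = "") -> bool:
--     x, y = 0, 0
--     coordinates: set = {(0,0)}
--     for direction in path:
--         match direction:
--             case "N": y += 1
--             case "S": y -= 1
--             case "E": x += 1
--             case "W": x -= 1
--         if not (x, y) in coordinates:
--             coordinates.add((x, y))
--         else: return True
--     return False
-- ===== SOURCE B (Python) =====
-- def touched_same_position(path: str = "") -> bool:
--     x, y = 0, 0
--     positions = [(0, 0)]
--     for direction in path:
--         match direction:
--             case "N": y += 1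
--             case "S": y -= 1
--             case "E": x += 1
--             case "W": x -= 1
--         positions.append((x, y))
--     return len(positions) != len(set(positions))
-- ===== Notes on version B (the rewrite author's own statement) =====
-- stated objective: alternative
-- what changed: Replaces the incremental set-membership check with early return by a two-phase approach: first build the full list of visited coordinates, then detect a revisit by comparing the list length with the number of distinct coordinates.
import Mathlib
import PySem

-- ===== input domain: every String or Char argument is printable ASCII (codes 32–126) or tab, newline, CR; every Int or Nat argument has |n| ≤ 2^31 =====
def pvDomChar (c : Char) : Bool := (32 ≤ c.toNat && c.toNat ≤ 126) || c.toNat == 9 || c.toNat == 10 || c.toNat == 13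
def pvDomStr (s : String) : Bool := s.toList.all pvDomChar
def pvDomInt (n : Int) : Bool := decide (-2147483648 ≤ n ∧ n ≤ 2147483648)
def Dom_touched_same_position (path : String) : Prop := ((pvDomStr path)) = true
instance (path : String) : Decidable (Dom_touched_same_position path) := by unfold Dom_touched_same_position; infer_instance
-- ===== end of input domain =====

-- B builds the full coordinate list first and then compares its length with the number of
-- distinct coordinates, instead of A's incremental set-membership check with early return.

-- ===== PORT A =====
-- loop over the path, keeping the set of visited coordinates; return True on first revisit
def pvGoA : List Char → Int → Int → PySem.Set (Int × Int) → Bool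
  | [], _, _, _ => false
  | direction :: rest, x, y, coordinates =>
    -- match direction (no default: any other character leaves x, y unchanged)
    let p : Int × Int :=
      if direction = 'N' then (x, y + 1)
      else if direction = 'S' then (x, y - 1)
      else if direction = 'E' then (x + 1, y)
      else if direction = 'W' then (x - 1, y)
      else (x, y)
    if !(PySem.Set.contains coordinates p) then
      pvGoA rest p.1 p.2 (PySem.Set.add coordinates p)
    else true

def touched_same_position (path : String) : Bool :=
  pvGoA path.toList 0 0 (PySem.Set.ofList [((0 : Int), (0 : Int))])

-- ===== PORT B =====
-- the coordinate after one step of the walk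
def pvStepB (direction : Char) (x y : Int) : Int × Int :=
  if direction = 'N' then (x, y + 1)
  else if direction = 'S' then (x, y - 1)
  else if direction = 'E' then (x + 1, y)
  else if direction = 'W' then (x - 1, y)
  else (x, y)

-- the list of coordinates visited after the start, in order (the appends of B's loop)
def pvPosB : List Char → Int → Int → List (Int × Int)
  | [], _, _ => []
  | direction :: rest, x, y =>
    let p := pvStepB direction x y
    p :: pvPosB rest p.1 p.2

def touched_same_position_alt (path : String) : Bool :=
  let positions := ((0 : Int), (0 : Int)) :: pvPosB path.toList 0 0
  decide (positions.length ≠ (PySem.Set.ofList positions).length)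

-- ===== PRECONDITION & SPEC =====
def Spec_touched_same_position (path : String) (out : Bool) : Prop := out = touched_same_position_alt path
instance (path : String) (out : Bool) : Decidable (Spec_touched_same_position path out) := by unfold Spec_touched_same_position; infer_instance

-- ===== CLAIM (what is proved, stated in full; the proofs are below) =====
def Claim_equal_touched_same_position : Prop := ∀ (path : String), Dom_touched_same_position path → Spec_touched_same_position path (touched_same_position path)

-- ===== LEMMAS AND PROOFS =====

theorem pv_ofList_append_singleton (l : List (Int × Int)) (a : Int × Int) :
    PySem.Set.ofList (l ++ [a]) = PySem.Set.add (PySem.Set.ofList l) a := by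
  simp [PySem.Set.ofList_eq_foldl, List.foldl_append]

theorem pv_len_ofList_eq_iff (l : List (Int × Int)) :
    (PySem.Set.ofList l).length = l.length ↔ l.Nodup := by
  induction l using List.reverseRecOn with
  | nil => simp [PySem.Set.ofList]
  | append_singleton l a ih =>
    rw [pv_ofList_append_singleton]
    by_cases h : a ∈ l
    · have hmem : a ∈ PySem.Set.ofList l := (PySem.Set.mem_ofList l a).mpr h
      have hadd : PySem.Set.add (PySem.Set.ofList l) a = PySem.Set.ofList l := by
        simp [PySem.Set.add, PySem.Set.contains, hmem]
      have hle := PySem.Set.length_ofList_le l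
      simp only [hadd, List.length_append, List.length_singleton]
      constructor
      · intro hlen; omega
      · intro hnd; exact absurd h (by simp [List.nodup_append] at hnd; tauto)
    · have hmem : a ∉ PySem.Set.ofList l := fun hm => h ((PySem.Set.mem_ofList l a).mp hm)
      have hadd : PySem.Set.add (PySem.Set.ofList l) a = PySem.Set.ofList l ++ [a] := by
        simp [PySem.Set.add, PySem.Set.contains, hmem]
      simp only [hadd, List.length_append, List.length_singleton]
      have hiff : (l ++ [a]).Nodup ↔ l.Nodup := by
        rw [List.nodup_append]
        constructor
        · exact fun hd => hd.1
        · intro h1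
          refine ⟨h1, List.nodup_singleton _, ?_⟩
          intro p hm b hb
          simp only [List.mem_singleton] at hb
          subst hb
          rintro rfl
          exact h hm
      rw [hiff, ← ih]
      omega


theorem pv_step_eq (d : Char) (x y : Int) :
    (if d = 'N' then (x, y + 1)
     else if d = 'S' then (x, y - 1)
     else if d = 'E' then (x + 1, y)
     else if d = 'W' then (x - 1, y)
     else (x, y)) = pvStepB d x y := rfl

theorem pv_goA_false_iff (l : List Char) :
    ∀ (x y : Int) (s : PySem.Set (Int × Int)), s.Nodup →
      (pvGoA l x y s = false ↔ (s ++ pvPosB l x y).Nodup) := by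
  induction l with
  | nil => intro x y s hs; simp [pvGoA, pvPosB, hs]
  | cons d rest ih =>
    intro x y s hs
    simp only [pvGoA, pvPosB]
    rw [pv_step_eq d x y]
    by_cases h : pvStepB d x y ∈ s
    · have hc : PySem.Set.contains s (pvStepB d x y) = true := by
        simp [PySem.Set.contains, h]
      rw [hc]
      simp only [Bool.not_true, Bool.false_eq_true, if_false]
      constructor
      · intro hfalse; cases hfalse
      · intro hnd
        exfalso
        rw [List.nodup_append] at hnd
        exact hnd.2.2 _ h _ (List.mem_cons_self ..) rfl
    · have hc : PySem.Set.contains s (pvStepB d x y) = false := by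
        unfold PySem.Set.contains
        simp [List.contains_eq_mem, h]
      have hadd : PySem.Set.add s (pvStepB d x y) = s ++ [pvStepB d x y] := by
        simp [PySem.Set.add, h]
      have hndadd : (s ++ [pvStepB d x y]).Nodup := by
        rw [List.nodup_append]
        refine ⟨hs, List.nodup_singleton _, ?_⟩
        intro p hm b hb
        simp only [List.mem_singleton] at hb
        subst hb
        rintro rfl
        exact h hm
      rw [hc, hadd]
      simp only [Bool.not_false, if_true]
      rw [ih (pvStepB d x y).1 (pvStepB d x y).2 (s ++ [pvStepB d x y]) hndadd]
      rw [List.append_assoc, List.singleton_append]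

-- ===== VERDICT (by name: the statement is the Claim_ definition above) =====
theorem touched_same_position_spec : Claim_equal_touched_same_position := by
  intro path _
  unfold Spec_touched_same_position touched_same_position touched_same_position_alt
  have hs0 : PySem.Set.ofList [((0 : Int), (0 : Int))] = [((0 : Int), (0 : Int))] := rfl
  have hA : pvGoA path.toList 0 0 (PySem.Set.ofList [((0 : Int), (0 : Int))]) = false ↔
      (((0 : Int), (0 : Int)) :: pvPosB path.toList 0 0).Nodup := by
    rw [hs0]
    simpa using pv_goA_false_iff path.toList 0 0 [((0 : Int), (0 : Int))] (List.nodup_singleton _)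
  set positions := ((0 : Int), (0 : Int)) :: pvPosB path.toList 0 0 with hpos
  have hB : (decide (positions.length ≠ (PySem.Set.ofList positions).length) = false) ↔
      positions.Nodup := by
    simp only [decide_not, Bool.not_eq_false', decide_eq_true_eq]
    exact ⟨fun h => (pv_len_ofList_eq_iff positions).mp h.symm,
           fun h => ((pv_len_ofList_eq_iff positions).mpr h).symm⟩
  have := hA.trans hB.symm
  revert this
  cases pvGoA path.toList 0 0 (PySem.Set.ofList [((0 : Int), (0 : Int))]) <;>
    cases hb : decide (positions.length ≠ (PySem.Set.ofList positions).length) <;> simp
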